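-- pv_equiv track=rewrite | github.com/MahdiBaghbani/Python-Encryption | sources/lib/FrequencyAnalyzer.py | get_word_order
-- ===== SOURCE A (Python) =====
-- import operator
-- from collections import defaultdict, namedtuple
--
-- def get_word_order(word_list: list, length) -> tuple:
--     dictionary = defaultdict(int)
--     for i in word_list:
--         if len(i) == length:
--             dictionary[i] += 1
--     dictionary.default_factory = None
--     dictionary = sorted(dictionary.items(), key=operator.itemgetter(1), reverse=True)
--     return tuple([i[0] for i in dictionary])
-- ===== SOURCE B (Python) =====
-- def get_word_order(word_list: list, length) -> tuple:
--     # Counting/bucket sort: no comparison sort; ties keep first-insertion order.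
--     counts = {}
--     for w in word_list:
--         if len(w) == length:
--             counts[w] = counts.get(w, 0) + 1
--     if not counts:
--         return ()
--     result = []
--     for f in range(max(counts.values()), 0, -1):
--         for w, c in counts.items():
--             if c == f:
--                 result.append(w)
--     return tuple(result)
-- ===== Notes on version B (the rewrite author's own statement) =====
-- stated objective: alternative
-- what changed: Replaces the comparison sort (sorted by count, reverse) with a counting/bucket pass: after building the same insertion-ordered count dict, B walks frequencies from the maximum down to 1 and emits the words of each frequency in dict (first-occurrence) order, reproducing the stable descending order without sorting.
import Mathlib
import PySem

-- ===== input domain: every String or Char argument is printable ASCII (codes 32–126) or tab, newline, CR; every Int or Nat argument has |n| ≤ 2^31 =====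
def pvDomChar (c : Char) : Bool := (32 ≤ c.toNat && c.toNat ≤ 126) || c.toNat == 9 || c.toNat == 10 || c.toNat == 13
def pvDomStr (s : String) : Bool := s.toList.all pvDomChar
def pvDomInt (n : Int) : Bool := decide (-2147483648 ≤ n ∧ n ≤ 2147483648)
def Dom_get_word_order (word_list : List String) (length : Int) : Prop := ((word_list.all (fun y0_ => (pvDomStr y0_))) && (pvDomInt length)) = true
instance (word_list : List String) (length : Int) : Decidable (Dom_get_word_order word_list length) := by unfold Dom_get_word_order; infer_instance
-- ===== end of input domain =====

-- B replaces the comparison sort (sorted by count, reverse=True) with a counting/bucket pass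
-- over frequencies from the maximum down to 1 (alternative algorithm, same results incl. ties).

-- ===== PORT A =====
def get_word_order (word_list : List String) (length : Int) : List String :=
  let dictionary := word_list.foldl
    (fun d i => if PySem.Str.len i = length then d.modify i 0 (· + 1) else d)
    (PySem.Dict.empty : PySem.Dict String Int)
  let sortedItems := PySem.List.sorted dictionary.items (fun p => p.2) true
  sortedItems.map (fun i => i.1)

-- ===== PORT B =====
def get_word_order_alt (word_list : List String) (length : Int) : List String :=
  let counts := word_list.foldl
    (fun d w => if PySem.Str.len w = length then d.insert w (d.getD w 0 + 1) else d)
    (PySem.Dict.empty : PySem.Dict String Int)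
  if counts.items.isEmpty then []
  else
    let m := (PySem.List.max? counts.values (fun v => v)).getD 0
    (PySem.List.pyRange m 0 (-1)).foldl
      (fun result f =>
        counts.items.foldl (fun r p => if p.2 = f then r ++ [p.1] else r) result)
      []

-- ===== PRECONDITION & SPEC =====
def Spec_get_word_order (word_list : List String) (length : Int) (out : List String) : Prop := out = get_word_order_alt word_list length
instance (word_list : List String) (length : Int) (out : List String) : Decidable (Spec_get_word_order word_list length out) := by unfold Spec_get_word_order; infer_instance

-- ===== CLAIM (what is proved, stated in full; the proofs are below) =====
def Claim_equal_get_word_order : Prop := ∀ (word_list : List String) (length : Int), Dom_get_word_order word_list length → Spec_get_word_order word_list length (get_word_order word_list length)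

-- ===== LEMMAS AND PROOFS =====

-- insertBy skips a prefix it never goes before, and lands in front of a suffix it always goes before
theorem insertBy_skip {α : Type} (before : α → α → Bool) (x : α) (ys zs : List α)
    (h : ∀ y ∈ ys, before x y = false) :
    PySem.List.insertBy before x (ys ++ zs) = ys ++ PySem.List.insertBy before x zs := by
  induction ys with
  | nil => simp
  | cons y ys ih =>
      simp only [List.cons_append, PySem.List.insertBy, h y (by simp)]
      simp only [Bool.false_eq_true, if_false, List.cons.injEq, true_and]
      exact ih (fun y hy => h y (by simp [hy]))

theorem insertBy_front {α : Type} (before : α → α → Bool) (x : α) (zs : List α)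
    (h : ∀ z ∈ zs, before x z = true) :
    PySem.List.insertBy before x zs = x :: zs := by
  cases zs with
  | nil => rfl
  | cons z zs => simp [PySem.List.insertBy, h z (by simp)]

-- inserting one element into the descending frequency buckets appends it to its bucket
theorem insertBy_buckets {α : Type} (key : α → Int) (l : List α) (x : α) (n : Nat)
    (h1 : 1 ≤ key x) (h2 : key x ≤ (n : Int)) :
    PySem.List.insertBy (fun a b => decide (key b < key a)) x
      ((PySem.List.pyRange (n : Int) 0 (-1)).flatMap (fun f => l.filter (fun y => key y = f)))
    = (PySem.List.pyRange (n : Int) 0 (-1)).flatMap (fun f => (l ++ [x]).filter (fun y => key y = f)) := by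
  induction n with
  | zero => omega
  | succ n ih =>
      have hcons : PySem.List.pyRange ((n : Int) + 1) 0 (-1)
          = ((n : Int) + 1) :: PySem.List.pyRange (n : Int) 0 (-1) := by
        have := PySem.List.pyRange_neg_one_cons (a := (n : Int) + 1) (b := 0) (by omega)
        simpa using this
      push_cast
      rw [hcons]
      simp only [List.flatMap_cons]
      by_cases hx : key x = (n : Int) + 1
      · -- x belongs to the top bucket: skip it, then go before everything below
        rw [insertBy_skip _ _ _ _ (by
            intro y hy
            simp only [List.mem_filter, decide_eq_true_eq] at hy
            simp [hy.2, hx]),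
          insertBy_front _ _ _ (by
            intro z hz
            simp only [List.mem_flatMap, List.mem_filter, decide_eq_true_eq] at hz
            obtain ⟨f, hf, _, hzf⟩ := hz
            rw [PySem.List.mem_pyRange_neg_one] at hf
            simp only [decide_eq_true_eq]
            omega)]
        have hrest : ∀ f ∈ PySem.List.pyRange (n : Int) 0 (-1),
            (l ++ [x]).filter (fun y => key y = f) = l.filter (fun y => key y = f) := by
          intro f hf
          rw [PySem.List.mem_pyRange_neg_one] at hf
          simp only [List.filter_append, List.filter_cons, List.filter_nil]
          have : ¬ (key x = f) := by omega
          simp [this]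
        rw [List.flatMap_congr (fun f hf => (hrest f hf).symm)] at *
        simp [List.filter_append, hx]
      · -- x belongs to a lower bucket: skip the top bucket and recurse
        rw [insertBy_skip _ _ _ _ (by
            intro y hy
            simp only [List.mem_filter, decide_eq_true_eq] at hy
            simp only [decide_eq_false_iff_not, not_lt]
            omega),
          ih (by omega)]
        have : (l ++ [x]).filter (fun y => key y = (n : Int) + 1)
            = l.filter (fun y => key y = (n : Int) + 1) := by
          simp [List.filter_append, hx]
        rw [this]

-- the stable descending sort by an Int key bounded in [1, n] IS the bucket concatenation
theorem sorted_rev_eq_buckets {α : Type} (key : α → Int) (l : List α) (n : Nat)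
    (h : ∀ x ∈ l, 1 ≤ key x ∧ key x ≤ (n : Int)) :
    PySem.List.sorted l key true
      = (PySem.List.pyRange (n : Int) 0 (-1)).flatMap (fun f => l.filter (fun y => key y = f)) := by
  induction l using List.reverseRecOn with
  | nil => simp [PySem.List.sorted_rev_eq_foldl_insertBy]
  | append_singleton l x ih =>
      rw [PySem.List.sorted_rev_eq_foldl_insertBy, List.foldl_append, List.foldl_cons,
        List.foldl_nil, ← PySem.List.sorted_rev_eq_foldl_insertBy,
        ih (fun y hy => h y (by simp [hy]))]
      exact insertBy_buckets key l x n (h x (by simp)).1 (h x (by simp)).2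

-- both counting loops build the same dict: counter of the length-matching words
theorem counts_eq_counter (word_list : List String) (length : Int) :
    word_list.foldl
      (fun d w => if PySem.Str.len w = length then d.insert w (d.getD w 0 + 1) else d)
      (PySem.Dict.empty : PySem.Dict String Int)
    = PySem.Dict.counter (word_list.filter (fun w => PySem.Str.len w = length)) := by
  rw [← PySem.Dict.foldl_insert_getD_add_one_eq_counter, List.foldl_filter]
  simp

theorem dictA_eq_counter (word_list : List String) (length : Int) :
    word_list.foldl
      (fun d i => if PySem.Str.len i = length then d.modify i 0 (· + 1) else d)
      (PySem.Dict.empty : PySem.Dict String Int)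
    = PySem.Dict.counter (word_list.filter (fun w => PySem.Str.len w = length)) := by
  rw [PySem.Dict.counter_eq_foldl, List.foldl_filter]
  simp

-- every value of a counter is at least 1
theorem counter_items_pos {κ : Type} [BEq κ] [LawfulBEq κ] (xs : List κ) (p : κ × Int)
    (hp : p ∈ (PySem.Dict.counter xs).items) : 1 ≤ p.2 := by
  rw [PySem.Dict.items_counter] at hp
  simp only [List.mem_map] at hp
  obtain ⟨k, hk, rfl⟩ := hp
  rw [PySem.Set.mem_ofList] at hk
  have := List.count_pos_iff.mpr hk
  simp only []
  omega

-- ===== VERDICT (by name: the statement is the Claim_ definition above) =====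
theorem get_word_order_spec : Claim_equal_get_word_order := by
  intro word_list length _
  unfold Spec_get_word_order get_word_order get_word_order_alt
  dsimp only []
  rw [counts_eq_counter]
  rw [dictA_eq_counter word_list length]
  set c := PySem.Dict.counter (word_list.filter (fun w => PySem.Str.len w = length))
  by_cases hemp : c.items = []
  · simp [hemp, PySem.List.sorted_rev_eq_foldl_insertBy]
  · simp only [List.isEmpty_iff, hemp, if_false]
    -- the max of the (nonempty) values
    have hvne : c.values ≠ [] := by
      simp only [PySem.Dict.values]
      exact fun h => hemp (List.map_eq_nil_iff.mp h)
    obtain ⟨m, hm⟩ : ∃ m, PySem.List.max? c.values (fun v => v) = some m := by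
      cases hmx : PySem.List.max? c.values (fun v => v) with
      | none => exact absurd ((PySem.List.max?_eq_none_iff _ _).mp hmx) hvne
      | some m => exact ⟨m, rfl⟩
    have hmmem : m ∈ c.values := PySem.List.max?_mem hm
    have hmpos : 1 ≤ m := by
      simp only [PySem.Dict.values, List.mem_map] at hmmem
      obtain ⟨p, hp, rfl⟩ := hmmem
      exact counter_items_pos _ p hp
    have hbound : ∀ p ∈ c.items, 1 ≤ p.2 ∧ p.2 ≤ (m.toNat : Int) := by
      intro p hp
      refine ⟨counter_items_pos _ p hp, ?_⟩
      have : p.2 ∈ c.values := by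
        simp only [PySem.Dict.values, List.mem_map]; exact ⟨p, hp, rfl⟩
      have := PySem.List.max?_isMax hm p.2 this
      omega
    have hmcast : ((m.toNat : Nat) : Int) = m := by omega
    rw [hm]
    simp only [Option.getD_some]
    -- turn B's nested folds into the bucket flatMap
    have inner : ∀ (f : Int) (res : List String),
        c.items.foldl (fun r p => if p.2 = f then r ++ [p.1] else r) res
          = res ++ (c.items.filter (fun p => p.2 = f)).map (fun p => p.1) := by
      intro f res
      have := PySem.List.foldl_append_if (fun p : String × Int => decide (p.2 = f))
        (fun p => p.1) c.items res
      simpa using this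
    calc (PySem.List.sorted c.items (fun p => p.2) true).map (fun i => i.1)
        = ((PySem.List.pyRange ((m.toNat : Nat) : Int) 0 (-1)).flatMap
            (fun f => c.items.filter (fun p => p.2 = f))).map (fun i => i.1) := by
          rw [sorted_rev_eq_buckets (fun p => p.2) c.items m.toNat hbound]
      _ = (PySem.List.pyRange m 0 (-1)).flatMap
            (fun f => (c.items.filter (fun p => p.2 = f)).map (fun p => p.1)) := by
          rw [hmcast, List.map_flatMap]
      _ = (PySem.List.pyRange m 0 (-1)).foldl
            (fun result f =>
              c.items.foldl (fun r p => if p.2 = f then r ++ [p.1] else r) result) [] := by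
          have hfun : (fun (result : List String) (f : Int) =>
                c.items.foldl (fun r p => if p.2 = f then r ++ [p.1] else r) result)
              = fun result f =>
                result ++ (c.items.filter (fun p => p.2 = f)).map (fun p => p.1) :=
            funext fun res => funext fun f => inner f res
          rw [hfun, PySem.List.foldl_append_eq_flatMap]
          simp
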